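-- pv_equiv track=rewrite | github.com/yhg0413/Algorithm-Study | 인프런강의/역수열.py | solution
-- ===== SOURCE A (Python) =====
-- def solution(n_len: int, n_list: list):
--     answer_list = [0 for i in range(n_len)]
--     for i, reverse_number in enumerate(n_list):  # 역수열 리스트를 전체 순회
--         count = 0
--         for j, answer in enumerate(answer_list):
--             if answer == 0 and count == reverse_number:  # 현재 인덱스의 값이 빈자리고 앞에 존재하는 수의 수가 일치할 때
--                 answer_list[j] = i + 1
--                 break
--             elif answer == 0:
--                 count += 1
--     return answer_list
-- ===== SOURCE B (Python) =====
-- def solution(n_len: int, n_list: list):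
--     # Keep a sorted list of still-empty slot indices; the k-th empty slot is
--     # then a direct lookup instead of a counting scan over the answer array.
--     answer = [0] * n_len
--     empties = list(range(n_len))
--     for i, r in enumerate(n_list):
--         if 0 <= r < len(empties):
--             answer[empties.pop(r)] = i + 1
--     return answer
-- ===== Notes on version B (the rewrite author's own statement) =====
-- stated objective: faster
-- what changed: Instead of rescanning the answer array counting empty slots for every element, B maintains a sorted list of still-empty slot indices and picks the k-th empty slot by direct indexing + pop, skipping out-of-range inversion counts exactly as A does.
import Mathlib
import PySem

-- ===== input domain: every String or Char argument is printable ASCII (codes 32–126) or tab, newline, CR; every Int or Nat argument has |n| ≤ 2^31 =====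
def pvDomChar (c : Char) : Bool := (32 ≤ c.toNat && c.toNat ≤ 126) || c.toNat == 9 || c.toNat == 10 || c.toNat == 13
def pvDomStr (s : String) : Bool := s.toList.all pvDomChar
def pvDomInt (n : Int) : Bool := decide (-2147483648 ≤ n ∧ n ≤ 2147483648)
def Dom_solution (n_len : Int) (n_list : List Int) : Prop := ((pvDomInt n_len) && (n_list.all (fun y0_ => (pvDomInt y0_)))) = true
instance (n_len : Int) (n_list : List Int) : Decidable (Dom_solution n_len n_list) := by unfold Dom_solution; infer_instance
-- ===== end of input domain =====

-- B replaces A's counting scan over the answer array by a maintained sorted list of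
-- still-empty slot indices with direct k-th lookup (same results, different state).

-- ===== PORT A =====
-- inner loop of A: scan answer_list with a zero-counter, place v at the r-th empty slot
def placeA (v r : Int) : List Int → Int → List Int
  | [], _ => []
  | a :: rest, count =>
    if a = 0 ∧ count = r then v :: rest
    else if a = 0 then a :: placeA v r rest (count + 1)
    else a :: placeA v r rest count

-- for i, reverse_number in enumerate(n_list)
def loopA (i : Int) (ans : List Int) : List Int → List Int
  | [] => ans
  | r :: rest => loopA (i + 1) (placeA (i + 1) r ans 0) rest

def solution (n_len : Int) (n_list : List Int) : List Int :=
  loopA 0 ((PySem.List.pyRange 0 n_len 1).map (fun _ => (0 : Int))) n_list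

-- ===== PORT B =====
-- for i, r in enumerate(n_list): if 0 <= r < len(empties): answer[empties.pop(r)] = i+1
-- (empties.pop(r) ported by hand as getElem! + eraseIdx: exact here since the guard
--  ensures 0 ≤ r < len(empties))
def loopB (i : Int) (ans : List Int) (empties : List Int) : List Int → List Int
  | [] => ans
  | r :: rest =>
    if 0 ≤ r ∧ r < (empties.length : Int) then
      loopB (i + 1) (ans.set (empties[r.toNat]!).toNat (i + 1)) (empties.eraseIdx r.toNat) rest
    else loopB (i + 1) ans empties rest

def solution_alt (n_len : Int) (n_list : List Int) : List Int :=
  loopB 0 (List.replicate n_len.toNat 0) (PySem.List.pyRange 0 n_len 1) n_list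

-- ===== PRECONDITION & SPEC =====
def Spec_solution (n_len : Int) (n_list : List Int) (out : List Int) : Prop := out = solution_alt n_len n_list
instance (n_len : Int) (n_list : List Int) (out : List Int) : Decidable (Spec_solution n_len n_list out) := by unfold Spec_solution; infer_instance

-- ===== CLAIM (what is proved, stated in full; the proofs are below) =====
def Claim_equal_solution : Prop := ∀ (n_len : Int) (n_list : List Int), Dom_solution n_len n_list → Spec_solution n_len n_list (solution n_len n_list)

-- ===== LEMMAS AND PROOFS =====

-- positions of zeros in a list, in increasing order
def zposN : List Int → List Nat
  | [] => []
  | a :: t => if a = 0 then 0 :: (zposN t).map (· + 1) else (zposN t).map (· + 1)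

-- set the m-th zero of the list to v
def setZero : List Int → Nat → Int → List Int
  | [], _, _ => []
  | a :: t, m, v =>
    if a = 0 then (if m = 0 then v :: t else a :: setZero t (m - 1) v)
    else a :: setZero t m v

lemma placeA_eq (v r : Int) : ∀ (ans : List Int) (c : Int),
    placeA v r ans c =
      if 0 ≤ r - c ∧ r - c < ((zposN ans).length : Int) then
        setZero ans (r - c).toNat v
      else ans := by
  intro ans
  induction ans with
  | nil => intro c; simp [placeA, zposN]
  | cons a t ih =>
    intro c
    by_cases ha : a = 0
    · by_cases hc : c = r
      · subst hc
        have h0 : c - c = 0 := by omega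
        have hcond : 0 ≤ c - c ∧ c - c < ((zposN (a :: t)).length : Int) := by
          refine ⟨by omega, ?_⟩
          rw [h0]
          simp [zposN, ha]
        rw [if_pos hcond, placeA, if_pos ⟨ha, rfl⟩]
        simp [setZero, ha]
      · have hne : ¬ (a = 0 ∧ c = r) := by simp [ha, hc]
        rw [placeA, if_neg hne, if_pos ha, ih (c + 1)]
        have hlen : ((zposN (a :: t)).length : Int) = ((zposN t).length : Int) + 1 := by
          simp [zposN, ha]
        by_cases h1 : 0 ≤ r - (c + 1) ∧ r - (c + 1) < ((zposN t).length : Int)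
        · rw [if_pos h1, if_pos (by rw [hlen]; omega)]
          have hm : (r - c).toNat = (r - (c + 1)).toNat + 1 := by omega
          simp [setZero, ha, hm]
        · rw [if_neg h1, if_neg (by rw [hlen]; omega)]
    · rw [placeA, if_neg (by simp [ha]), if_neg ha, ih c]
      have hlen : ((zposN (a :: t)).length : Int) = ((zposN t).length : Int) := by
        simp [zposN, ha]
      by_cases h1 : 0 ≤ r - c ∧ r - c < ((zposN t).length : Int)
      · rw [if_pos h1, if_pos (by rw [hlen]; omega)]
        simp [setZero, ha]
      · rw [if_neg h1, if_neg (by rw [hlen]; omega)]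

lemma set_zpos_eq (v : Int) : ∀ (ans : List Int) (m : Nat) (h : m < (zposN ans).length),
    ans.set (zposN ans)[m] v = setZero ans m v := by
  intro ans
  induction ans with
  | nil => intro m h; simp [zposN] at h
  | cons a t ih =>
    intro m h
    by_cases ha : a = 0
    · cases m with
      | zero => simp [zposN, ha, setZero]
      | succ k =>
        have hk : k < (zposN t).length := by
          simpa [zposN, ha] using h
        have : (zposN (a :: t))[k + 1] = (zposN t)[k] + 1 := by
          simp [zposN, ha]
        rw [this]
        simp only [List.set_cons_succ]
        rw [ih k hk]
        simp [setZero, ha]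
    · have hm : m < (zposN t).length := by simpa [zposN, ha] using h
      have : (zposN (a :: t))[m] = (zposN t)[m] + 1 := by
        simp [zposN, ha]
      rw [this]
      simp only [List.set_cons_succ]
      rw [ih m hm]
      simp [setZero, ha]

lemma eraseIdx_map_add_one : ∀ (l : List Nat) (m : Nat),
    (l.map (· + 1)).eraseIdx m = (l.eraseIdx m).map (· + 1) := by
  intro l
  induction l with
  | nil => intro m; simp
  | cons x t ih =>
    intro m
    cases m with
    | zero => simp
    | succ k => simp [List.eraseIdx_cons_succ, ih k]

lemma zpos_setZero (v : Int) (hv : v ≠ 0) : ∀ (ans : List Int) (m : Nat),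
    zposN (setZero ans m v) = (zposN ans).eraseIdx m := by
  intro ans
  induction ans with
  | nil => intro m; simp [setZero, zposN]
  | cons a t ih =>
    intro m
    by_cases ha : a = 0
    · cases m with
      | zero => simp [setZero, ha, zposN, hv]
      | succ k =>
        simp [setZero, ha, zposN, ih k, List.eraseIdx_cons_succ, eraseIdx_map_add_one]
    · simp [setZero, ha, zposN, ih m, eraseIdx_map_add_one]

lemma loop_eq : ∀ (rest : List Int) (i : Int) (ans : List Int), 0 ≤ i →
    loopB i ans ((zposN ans).map Int.ofNat) rest = loopA i ans rest := by
  intro rest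
  induction rest with
  | nil => intro i ans _; simp [loopA, loopB]
  | cons r rest ih =>
    intro i ans hi
    rw [loopA, loopB]
    have hlen : (((zposN ans).map Int.ofNat).length : Int) = ((zposN ans).length : Int) := by
      simp
    have hA := placeA_eq (i + 1) r ans 0
    simp only [sub_zero] at hA
    by_cases hg : 0 ≤ r ∧ r < (((zposN ans).map Int.ofNat).length : Int)
    · rw [if_pos hg]
      have hr : r.toNat < (zposN ans).length := by
        have := hg.2; rw [hlen] at this; omega
      have hget : ((zposN ans).map Int.ofNat)[r.toNat]! = ((zposN ans)[r.toNat] : Int) := by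
        rw [getElem!_pos _ _ (by simpa using hr)]
        simp
      have hset : ans.set ((((zposN ans).map Int.ofNat)[r.toNat]!).toNat) (i + 1)
          = setZero ans r.toNat (i + 1) := by
        rw [hget]
        simpa using set_zpos_eq (i + 1) ans r.toNat hr
      have herase : ((zposN ans).map Int.ofNat).eraseIdx r.toNat
          = (zposN (setZero ans r.toNat (i + 1))).map Int.ofNat := by
        rw [zpos_setZero (i + 1) (by omega) ans r.toNat, List.eraseIdx_map]
      rw [hA, if_pos (by rw [← hlen]; exact ⟨hg.1, hg.2⟩), hset, herase]
      exact ih (i + 1) _ (by omega)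
    · rw [if_neg hg, hA, if_neg (by rw [← hlen]; exact hg)]
      exact ih (i + 1) ans (by omega)

lemma init_ans (n_len : Int) :
    (PySem.List.pyRange 0 n_len 1).map (fun _ => (0 : Int)) = List.replicate n_len.toNat 0 := by
  rw [List.eq_replicate_iff]
  constructor
  · simp [PySem.List.length_pyRange_one]
  · intro b hb
    simp at hb
    omega

lemma zpos_replicate : ∀ (m : Nat), zposN (List.replicate m 0) = List.range m := by
  intro m
  induction m with
  | zero => simp [zposN]
  | succ k ih =>
    rw [List.replicate_succ, List.range_succ_eq_map]
    simp [zposN, ih]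

lemma init_empties (n_len : Int) :
    PySem.List.pyRange 0 n_len 1 = (zposN (List.replicate n_len.toNat 0)).map Int.ofNat := by
  rw [zpos_replicate, PySem.List.pyRange_one]
  simp only [sub_zero, zero_add]
  rfl

-- ===== VERDICT (by name: the statement is the Claim_ definition above) =====
theorem solution_spec : Claim_equal_solution := by
  intro n_len n_list _
  unfold Spec_solution solution solution_alt
  rw [init_ans, init_empties]
  exact (loop_eq n_list 0 (List.replicate n_len.toNat 0) le_rfl).symm
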